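-- pv_equiv track=rewrite | github.com/phungthanhloan1996/ai-recon-agent | core/wordlist_generator.py | optimize_by_priority
-- ===== SOURCE A (Python) =====
-- from typing import List, Set, Tuple
--
-- def optimize_by_priority(wordlist: List[str], priority_keywords: List[str] = None) -> List[str]:
--     """
--     Prioritize wordlist by keywords
--     """
--     if not priority_keywords:
--         return wordlist
--
--     # Sort with priority keywords first
--     def priority_key(word):
--         for i, keyword in enumerate(priority_keywords):
--             if keyword.lower() in word.lower():
--                 return (i, word)
--         return (len(priority_keywords), word)
--
--     return sorted(wordlist, key=priority_key)
-- ===== SOURCE B (Python) =====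
-- def _rank(lows, wl):
--     i = 0
--     while i < len(lows) and lows[i] not in wl:
--         i += 1
--     return i
--
-- def optimize_by_priority(wordlist, priority_keywords=None):
--     """
--     Prioritize wordlist by keywords (bucket by first matching keyword, sort each bucket).
--     """
--     if not priority_keywords:
--         return wordlist
--     lows = [kw.lower() for kw in priority_keywords]
--     buckets = [[] for _ in range(len(lows) + 1)]
--     for w in wordlist:
--         buckets[_rank(lows, w.lower())].append(w)
--     result = []
--     for b in buckets:
--         result.extend(sorted(b))
--     return result
-- ===== Notes on version B (the rewrite author's own statement) =====
-- stated objective: alternative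
-- what changed: Replaces the single sorted(key=(first-keyword-index, word)) call by an explicit bucket pass: words are grouped by the index of the first matching lowercased keyword and the result is the concatenation of the plainly-sorted buckets in index order.
import Mathlib
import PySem

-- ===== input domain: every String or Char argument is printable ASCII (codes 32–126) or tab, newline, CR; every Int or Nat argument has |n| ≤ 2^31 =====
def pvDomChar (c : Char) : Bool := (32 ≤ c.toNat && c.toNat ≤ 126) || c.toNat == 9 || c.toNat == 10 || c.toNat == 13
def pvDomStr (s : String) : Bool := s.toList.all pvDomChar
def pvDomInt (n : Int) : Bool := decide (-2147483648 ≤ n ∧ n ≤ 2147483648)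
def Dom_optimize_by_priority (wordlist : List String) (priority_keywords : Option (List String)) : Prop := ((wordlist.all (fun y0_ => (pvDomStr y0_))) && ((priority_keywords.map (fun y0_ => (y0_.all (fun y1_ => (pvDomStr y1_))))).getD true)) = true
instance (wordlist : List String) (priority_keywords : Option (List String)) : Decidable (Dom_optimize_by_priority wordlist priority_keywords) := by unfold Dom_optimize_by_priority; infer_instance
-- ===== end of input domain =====

-- B replaces A's single sorted(key=(first-keyword-index, word)) call by an explicit
-- bucket pass (group words by first matching keyword, concatenate plainly sorted buckets);
-- objective: alternative decomposition, same return value.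

-- ===== PORT A =====
-- A's inner `priority_key(word)` loop: `for i, keyword in enumerate(priority_keywords)`
-- carried as an explicit index, early return on the first match.
def pvPriorityKeyGo (priority_keywords : List String) (word : String) :
    Nat → List String → Nat × String
  | _, [] => (priority_keywords.length, word)
  | i, kw :: rest =>
      if PySem.Str.isIn (PySem.Str.lower kw) (PySem.Str.lower word) then (i, word)
      else pvPriorityKeyGo priority_keywords word (i + 1) rest

def pvPriorityKey (priority_keywords : List String) (word : String) : Nat × String :=
  pvPriorityKeyGo priority_keywords word 0 priority_keywords

def optimize_by_priority (wordlist : List String) (priority_keywords : Option (List String)) : List String :=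
  match priority_keywords with
  | none => wordlist
  | some pks =>
      if pks.isEmpty then wordlist
      else
        PySem.List.sorted2 wordlist
          (fun w => (pvPriorityKey pks w).1) (fun w => (pvPriorityKey pks w).2) false

-- ===== PORT B =====
-- B's `_rank(lows, wl)` while loop: index of the first low keyword contained in wl.
def pvRank : List String → String → Nat
  | [], _ => 0
  | kw :: rest, wl => if PySem.Str.isIn kw wl then 0 else pvRank rest wl + 1

def optimize_by_priority_alt (wordlist : List String) (priority_keywords : Option (List String)) : List String :=
  match priority_keywords with
  | none => wordlist
  | some pks =>
      if pks.isEmpty then wordlist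
      else
        let lows := pks.map PySem.Str.lower
        let buckets := wordlist.foldl
          (fun bs w => bs.modify (pvRank lows (PySem.Str.lower w)) (fun b => b ++ [w]))
          (List.replicate (pks.length + 1) [])
        buckets.foldl (fun result b => result ++ PySem.List.sorted b (fun w => w) false) []

-- ===== PRECONDITION & SPEC =====
def Spec_optimize_by_priority (wordlist : List String) (priority_keywords : Option (List String)) (out : List String) : Prop := out = optimize_by_priority_alt wordlist priority_keywords
instance (wordlist : List String) (priority_keywords : Option (List String)) (out : List String) : Decidable (Spec_optimize_by_priority wordlist priority_keywords out) := by unfold Spec_optimize_by_priority; infer_instance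

-- ===== CLAIM (what is proved, stated in full; the proofs are below) =====
def Claim_equal_optimize_by_priority : Prop := ∀ (wordlist : List String) (priority_keywords : Option (List String)), Dom_optimize_by_priority wordlist priority_keywords → Spec_optimize_by_priority wordlist priority_keywords (optimize_by_priority wordlist priority_keywords)

-- ===== LEMMAS AND PROOFS =====

-- the common sort key: (index of first matching keyword, the word), lexicographically
def pvKey (pks : List String) (w : String) : Lex (Nat × String) :=
  toLex ((pvPriorityKey pks w).1, w)

theorem pvPriorityKeyGo_snd (pks : List String) (word : String) (i : Nat) (rest : List String) :
    (pvPriorityKeyGo pks word i rest).2 = word := by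
  induction rest generalizing i with
  | nil => rfl
  | cons kw rest ih => simp only [pvPriorityKeyGo]; split <;> simp [ih]

theorem pvPriorityKeyGo_fst (pks : List String) (word : String) (rest : List String) (i : Nat)
    (h : i + rest.length = pks.length) :
    (pvPriorityKeyGo pks word i rest).1 = i + pvRank (rest.map PySem.Str.lower) (PySem.Str.lower word) := by
  induction rest generalizing i with
  | nil => simp only [pvPriorityKeyGo, List.map_nil, pvRank]; simp at h ⊢; omega
  | cons kw rest ih =>
      simp only [pvPriorityKeyGo, List.map_cons, pvRank]
      split
      · simp
      · rw [ih (i + 1) (by simp at h ⊢; omega)]; omega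

theorem pvPriorityKey_fst (pks : List String) (w : String) :
    (pvPriorityKey pks w).1 = pvRank (pks.map PySem.Str.lower) (PySem.Str.lower w) := by
  simpa using pvPriorityKeyGo_fst pks w pks 0 (by simp)

theorem pvRank_le (lows : List String) (wl : String) : pvRank lows wl ≤ lows.length := by
  induction lows with
  | nil => simp [pvRank]
  | cons kw rest ih =>
      simp only [pvRank]
      split
      · simp
      · simp only [List.length_cons]; omega

theorem pvKey_injective (pks : List String) : Function.Injective (pvKey pks) := by
  intro a b h
  have := congrArg (fun x => (ofLex x).2) h
  simpa [pvKey] using this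

-- sorted2 with keys k1, k2 is sorted with the lexicographic pair key
theorem sorted2_eq_sorted_toLex {α : Type} (xs : List α) (k1 : α → Nat) (k2 : α → String) :
    PySem.List.sorted2 xs k1 k2 false
      = PySem.List.sorted xs (fun a => toLex (k1 a, k2 a)) false := by
  show List.foldl (fun acc x => PySem.List.insertBy
      (fun a b => decide (k1 a < k1 b) || (!decide (k1 b < k1 a) && decide (k2 a < k2 b))) x acc) [] xs
    = List.foldl (fun acc x => PySem.List.insertBy
      (fun a b => decide (toLex (k1 a, k2 a) < toLex (k1 b, k2 b))) x acc) [] xs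
  congr 1
  funext acc x
  congr 1
  funext a b
  simp only [Prod.Lex.toLex_lt_toLex]
  rcases lt_trichotomy (k1 a) (k1 b) with h | h | h
  · simp [h]
  · simp [h]
  · simp [h, lt_asymm h]; omega

-- flatMap of rank-buckets over range n collects exactly the words of rank < n
theorem pv_partition_perm (l : List String) (f : String → Nat) (n : Nat) :
    ((List.range n).flatMap (fun i => l.filter (fun w => f w == i))).Perm
      (l.filter (fun w => decide (f w < n))) := by
  induction n with
  | zero => simp
  | succ n ih =>
      rw [List.range_succ, List.flatMap_append]
      simp only [List.flatMap_cons, List.flatMap_nil, List.append_nil]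
      have h1 : l.filter (fun w => decide (f w < n))
          = (l.filter (fun w => decide (f w < n + 1))).filter (fun w => decide (f w < n)) := by
        rw [List.filter_filter]
        exact (List.filter_congr (fun w _ => by
          by_cases h : f w < n
          · simp [h]; omega
          · simp [h])).symm
      have h2 : l.filter (fun w => f w == n)
          = (l.filter (fun w => decide (f w < n + 1))).filter (fun w => !decide (f w < n)) := by
        rw [List.filter_filter]
        exact (List.filter_congr (fun w _ => by
          rcases Nat.lt_trichotomy (f w) n with h | h | h
          · simp [Nat.ne_of_lt h, h]
          · simp [h]
          · have h1 : ((f w == n) : Bool) = false := by simp; omega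
            have h2 : (decide (f w < n + 1) : Bool) = false := by simp; omega
            rw [h1, h2, Bool.and_false])).symm
      refine (List.Perm.append_right _ ih).trans ?_
      rw [h1, h2]
      exact List.filter_append_perm _ _

-- the bucket fold characterised bucket-by-bucket
theorem pvFold_length (r : String → Nat) (l : List String) (bs : List (List String)) :
    (l.foldl (fun bs w => bs.modify (r w) (fun b => b ++ [w])) bs).length = bs.length := by
  induction l generalizing bs with
  | nil => rfl
  | cons w l ih => simp [ih, List.length_modify]

theorem pvFold_getElem (r : String → Nat) (l : List String) (bs : List (List String))
    (hb : ∀ w ∈ l, r w < bs.length) (i : Nat) (hi : i < bs.length)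
    (hi' : i < (l.foldl (fun bs w => bs.modify (r w) (fun b => b ++ [w])) bs).length) :
    (l.foldl (fun bs w => bs.modify (r w) (fun b => b ++ [w])) bs)[i]
      = bs[i] ++ l.filter (fun w => r w == i) := by
  induction l generalizing bs with
  | nil => simp
  | cons w l ih =>
      simp only [List.foldl_cons, List.filter_cons]
      have hlen : (bs.modify (r w) (fun b => b ++ [w])).length = bs.length :=
        List.length_modify _ _ _
      have hrec := ih (bs.modify (r w) (fun b => b ++ [w]))
        (fun v hv => by rw [hlen]; exact hb v (by simp [hv]))
        (hlen ▸ hi) (by rw [pvFold_length, hlen]; exact hi)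
      rw [hrec, List.getElem_modify]
      by_cases h : r w = i
      · simp [h, List.append_assoc]
      · simp [h]

theorem pvBuckets_eq (r : String → Nat) (l : List String) (n : Nat)
    (hb : ∀ w ∈ l, r w < n + 1) :
    l.foldl (fun bs w => bs.modify (r w) (fun b => b ++ [w])) (List.replicate (n + 1) [])
      = (List.range (n + 1)).map (fun i => l.filter (fun w => r w == i)) := by
  apply List.ext_getElem
  · rw [pvFold_length]; simp
  · intro i hi hi'
    have hlen : i < (List.replicate (n + 1) ([] : List String)).length := by
      rw [pvFold_length] at hi; exact hi
    rw [pvFold_getElem r l _ (by simpa using hb) i hlen hi]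
    simp

theorem pv_branch_eq (wordlist : List String) (pks : List String) :
    PySem.List.sorted2 wordlist
        (fun w => (pvPriorityKey pks w).1) (fun w => (pvPriorityKey pks w).2) false
      = (wordlist.foldl
            (fun bs w => bs.modify (pvRank (pks.map PySem.Str.lower) (PySem.Str.lower w)) (fun b => b ++ [w]))
            (List.replicate (pks.length + 1) [])).foldl
          (fun result b => result ++ PySem.List.sorted b (fun w => w) false) [] := by
  set r : String → Nat := fun w => pvRank (pks.map PySem.Str.lower) (PySem.Str.lower w) with hr
  set g : Nat → List String := fun i =>
    PySem.List.sorted (wordlist.filter (fun w => r w == i)) (fun w => w) false with hg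
  have hbound0 : ∀ w ∈ wordlist, r w < pks.length + 1 := by
    intro w _
    have h := pvRank_le (pks.map PySem.Str.lower) (PySem.Str.lower w)
    rw [List.length_map] at h
    simp only [hr]
    omega
  rw [pvBuckets_eq r wordlist pks.length hbound0,
      PySem.List.foldl_append_eq_flatMap, List.nil_append, List.flatMap_map]
  have hrk : ∀ w, (pvPriorityKey pks w).1 = r w := fun w => pvPriorityKey_fst pks w
  have hA : (fun w => toLex ((pvPriorityKey pks w).1, (pvPriorityKey pks w).2)) = pvKey pks := by
    funext w; simp [pvKey, pvPriorityKey, pvPriorityKeyGo_snd]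
  rw [sorted2_eq_sorted_toLex, hA]
  -- membership in a bucket pins the rank
  have hmem : ∀ i, ∀ w ∈ g i, r w = i := by
    intro i w hw
    have := (PySem.List.sorted_perm (wordlist.filter (fun w => r w == i)) (fun w => w) false).mem_iff.mp hw
    simpa using (List.mem_filter.mp this).2
  apply PySem.List.eq_of_perm_of_pairwise_le_of_injective (pvKey pks) (pvKey_injective pks)
  · -- permutation
    refine (PySem.List.sorted_perm wordlist (pvKey pks) false).trans ?_
    refine List.Perm.symm ?_
    have h1 : ((List.range (pks.length + 1)).flatMap g).Perm
        ((List.range (pks.length + 1)).flatMap (fun i => wordlist.filter (fun w => r w == i))) := by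
      refine List.Perm.flatMap_left _ ?_
      intro i _
      exact PySem.List.sorted_perm _ _ _
    refine h1.trans ?_
    refine (pv_partition_perm wordlist r (pks.length + 1)).trans ?_
    rw [List.filter_eq_self.mpr (fun w hw => by simpa using hbound0 w hw)]
  · -- A side pairwise
    exact PySem.List.sorted_pairwise wordlist (pvKey pks)
  · -- B side pairwise
    rw [List.pairwise_flatMap]
    constructor
    · intro i _
      refine (PySem.List.sorted_pairwise _ (fun w : String => w)).imp_of_mem ?_
      intro a b ha hb hab
      have hra := hmem i a ha
      have hrb := hmem i b hb
      unfold pvKey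
      rw [Prod.Lex.toLex_le_toLex]
      exact Or.inr ⟨by rw [hrk, hrk, hra, hrb], hab⟩
    · refine List.pairwise_lt_range.imp_of_mem ?_
      intro i j _ _ hij a ha b hb
      have hra := hmem i a ha
      have hrb := hmem j b hb
      have : pvKey pks a < pvKey pks b := by
        unfold pvKey
        rw [Prod.Lex.toLex_lt_toLex]
        exact Or.inl (by rw [hrk, hrk, hra, hrb]; exact hij)
      exact le_of_lt this

-- ===== VERDICT (by name: the statement is the Claim_ definition above) =====
theorem optimize_by_priority_spec : Claim_equal_optimize_by_priority := by
  intro wordlist priority_keywords _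
  unfold Spec_optimize_by_priority optimize_by_priority optimize_by_priority_alt
  match priority_keywords with
  | none => rfl
  | some pks =>
      by_cases h : pks.isEmpty
      · simp [h]
      · simp only [h]
        exact pv_branch_eq wordlist pks
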